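-- pv_equiv track=rewrite | github.com/Arkadiy-Garber/BagOfTricks | cytoscan.py | checkDFE2
-- ===== SOURCE A (Python) =====
-- def checkDFE2(ls):
--     count = 0
--     uniqueLS = []
--     for i in ls:
--         hmm = i.split("|")[0]
--         if hmm not in uniqueLS:
--             uniqueLS.append(hmm)
--             if hmm in ["DFE_0448", "DFE_0449", "DFE_0450", "DFE_0451"]:
--                 count += 1
--     return count
-- ===== SOURCE B (Python) =====
-- def checkDFE2(ls):
--     firsts = set()
--     for i in ls:
--         firsts.add(i.split("|")[0])
--     count = 0
--     for t in ["DFE_0448", "DFE_0449", "DFE_0450", "DFE_0451"]: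
--         if t in firsts:
--             count += 1
--     return count
-- ===== Notes on version B (the rewrite author's own statement) =====
-- stated objective: faster
-- what changed: Inverts the loop structure: one pass collects first-tokens into a set, then a second loop over the four fixed target IDs counts those present, removing A's O(n) 'not in uniqueLS' list scan inside the loop.
import Mathlib
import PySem

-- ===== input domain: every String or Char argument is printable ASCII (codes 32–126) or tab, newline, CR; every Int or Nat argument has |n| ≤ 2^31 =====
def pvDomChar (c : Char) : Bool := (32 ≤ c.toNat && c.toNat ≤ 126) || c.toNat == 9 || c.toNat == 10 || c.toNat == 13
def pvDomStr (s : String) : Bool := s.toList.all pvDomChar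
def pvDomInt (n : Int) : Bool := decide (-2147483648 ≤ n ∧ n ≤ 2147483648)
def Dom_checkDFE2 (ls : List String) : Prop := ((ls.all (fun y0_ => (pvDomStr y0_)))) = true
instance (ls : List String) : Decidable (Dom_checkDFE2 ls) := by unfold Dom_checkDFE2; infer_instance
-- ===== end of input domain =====

-- B inverts the loops: one pass builds the set of first-tokens, then a loop over the
-- four fixed target IDs counts those present — simpler, and no inner list scan.

-- i.split("|")[0]: split? with a nonempty separator always returns `some` of a
-- nonempty list, so the [0] index never raises; getD/headD are exact here.
def pvFirstTok (i : String) : String := ((PySem.Str.split? i "|").getD []).headD ""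

def pvTargets : List String := ["DFE_0448", "DFE_0449", "DFE_0450", "DFE_0451"]

-- ===== PORT A =====
def checkDFE2 (ls : List String) : Int :=
  (ls.foldl
    (fun (st : Int × List String) i =>
      let hmm := pvFirstTok i
      if hmm ∈ st.2 then st
      else (st.1 + (if hmm ∈ pvTargets then 1 else 0), st.2 ++ [hmm]))
    (0, [])).1

-- ===== PORT B =====
def checkDFE2_alt (ls : List String) : Int :=
  let firsts : PySem.Set String :=
    ls.foldl (fun s i => PySem.Set.add s (pvFirstTok i)) PySem.Set.empty
  pvTargets.foldl (fun c t => if t ∈ firsts then c + 1 else c) 0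

-- ===== PRECONDITION & SPEC =====
def Spec_checkDFE2 (ls : List String) (out : Int) : Prop := out = checkDFE2_alt ls
instance (ls : List String) (out : Int) : Decidable (Spec_checkDFE2 ls out) := by unfold Spec_checkDFE2; infer_instance

-- ===== CLAIM (what is proved, stated in full; the proofs are below) =====
def Claim_equal_checkDFE2 : Prop := ∀ (ls : List String), Dom_checkDFE2 ls → Spec_checkDFE2 ls (checkDFE2 ls)

-- ===== LEMMAS AND PROOFS =====

-- Splitting off a fresh element hmm ∉ u from the "newly seen" count, for a Nodup target list.
lemma pv_countP_insert (ts : List String) (hts : ts.Nodup) (u fr : List String)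
    (hmm : String) (h : hmm ∉ u) :
    ts.countP (fun t => decide (t ∉ u ∧ (t = hmm ∨ t ∈ fr))) =
    (if hmm ∈ ts then 1 else 0) +
      ts.countP (fun t => decide (¬(t ∈ u ∨ t = hmm) ∧ t ∈ fr)) := by
  induction ts with
  | nil => simp
  | cons a ts ih =>
    rcases List.nodup_cons.mp hts with ⟨ha, hts'⟩
    rw [List.countP_cons, List.countP_cons]
    by_cases hah : a = hmm
    · subst hah
      have hih := ih hts'
      rw [if_neg ha, zero_add] at hih
      have e1 : decide (a ∉ u ∧ (a = a ∨ a ∈ fr)) = true := by simp [h]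
      have e2 : decide (¬(a ∈ u ∨ a = a) ∧ a ∈ fr) = false := by simp
      rw [e1, e2, hih, if_pos (List.mem_cons_self)]
      simp [Nat.add_comm]
    · have e : (decide (a ∉ u ∧ (a = hmm ∨ a ∈ fr))) =
          (decide (¬(a ∈ u ∨ a = hmm) ∧ a ∈ fr)) := by
        apply decide_eq_decide.mpr
        constructor
        · rintro ⟨hau, (rfl | hafr)⟩
          · exact absurd rfl hah
          · exact ⟨by tauto, hafr⟩
        · rintro ⟨hn, hafr⟩
          exact ⟨fun hx => hn (Or.inl hx), Or.inr hafr⟩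
      have e3 : (if hmm ∈ a :: ts then (1 : ℕ) else 0) = (if hmm ∈ ts then 1 else 0) := by
        by_cases hin : hmm ∈ ts
        · simp [List.mem_cons, hin]
        · have hna : ¬hmm = a := fun hx => hah hx.symm
          simp [List.mem_cons, hin, hna]
      rw [e, e3, ih hts']
      omega

-- Loop invariant for A: the running count plus the targets newly reachable from the rest.
lemma pv_loopA (ls : List String) : ∀ (c : Int) (u : List String),
    (ls.foldl
      (fun (st : Int × List String) i =>
        let hmm := pvFirstTok i
        if hmm ∈ st.2 then st
        else (st.1 + (if hmm ∈ pvTargets then 1 else 0), st.2 ++ [hmm]))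
      (c, u)).1 =
    c + (pvTargets.countP (fun t => decide (t ∉ u ∧ t ∈ ls.map pvFirstTok)) : Int) := by
  induction ls with
  | nil => intro c u; simp
  | cons i ls ih =>
    intro c u
    by_cases hmem : pvFirstTok i ∈ u
    · have hcp : pvTargets.countP
          (fun t => decide (t ∉ u ∧ t ∈ (i :: ls).map pvFirstTok)) =
          pvTargets.countP (fun t => decide (t ∉ u ∧ t ∈ ls.map pvFirstTok)) := by
        apply List.countP_congr
        intro t _
        simp only [decide_eq_true_eq, List.map_cons, List.mem_cons]
        constructor
        · rintro ⟨htu, (rfl | hx)⟩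
          · exact absurd hmem htu
          · exact ⟨htu, hx⟩
        · rintro ⟨htu, hx⟩
          exact ⟨htu, Or.inr hx⟩
      simp only [List.foldl_cons, if_pos hmem, ih, hcp]
    · have hsplit := pv_countP_insert pvTargets (by decide) u (ls.map pvFirstTok)
        (pvFirstTok i) hmem
      have hcong : pvTargets.countP
          (fun t => decide (¬(t ∈ u ∨ t = pvFirstTok i) ∧ t ∈ ls.map pvFirstTok)) =
          pvTargets.countP
          (fun t => decide (t ∉ u ++ [pvFirstTok i] ∧ t ∈ ls.map pvFirstTok)) := by
        apply List.countP_congr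
        intro t _
        simp [List.mem_append]
      have hhead : pvTargets.countP
          (fun t => decide (t ∉ u ∧ t ∈ (i :: ls).map pvFirstTok)) =
          (if pvFirstTok i ∈ pvTargets then 1 else 0) +
          pvTargets.countP
            (fun t => decide (t ∉ u ++ [pvFirstTok i] ∧ t ∈ ls.map pvFirstTok)) := by
        rw [← hcong, ← hsplit]
        apply List.countP_congr
        intro t _
        simp only [decide_eq_true_eq, List.map_cons, List.mem_cons]
      simp only [List.foldl_cons, if_neg hmem, ih, hhead]
      push_cast
      by_cases htg : pvFirstTok i ∈ pvTargets
      · rw [if_pos htg]; ring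
      · rw [if_neg htg]; ring

-- B's counting loop is a countP over membership in the set it built.
lemma pv_loopB (ts : List String) : ∀ (c : Int) (s : List String),
    ts.foldl (fun c t => if t ∈ s then c + 1 else c) c =
    c + (ts.countP (fun t => decide (t ∈ s)) : Int) := by
  induction ts with
  | nil => intro c s; simp
  | cons a ts ih =>
    intro c s
    by_cases ha : a ∈ s
    · simp [ha, ih]
      omega
    · simp [ha, ih]

-- B's first pass is set(first-tokens of ls).
lemma pv_firsts (ls : List String) :
    ls.foldl (fun s i => PySem.Set.add s (pvFirstTok i)) PySem.Set.empty =
    PySem.Set.ofList (ls.map pvFirstTok) := by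
  rw [PySem.Set.ofList_eq_foldl, List.foldl_map]
  rfl

-- ===== VERDICT (by name: the statement is the Claim_ definition above) =====
theorem checkDFE2_spec : Claim_equal_checkDFE2 := by
  intro ls _
  unfold Spec_checkDFE2 checkDFE2 checkDFE2_alt
  rw [pv_loopA ls 0 [], pv_firsts, pv_loopB]
  have h : pvTargets.countP (fun t => decide (t ∉ ([] : List String) ∧ t ∈ ls.map pvFirstTok)) =
      pvTargets.countP (fun t => decide (t ∈ PySem.Set.ofList (ls.map pvFirstTok))) := by
    apply List.countP_congr
    intro t _
    simp [PySem.Set.mem_ofList]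
  rw [h]
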